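-- pv_equiv track=rewrite | github.com/razenrtyu/practice | Banahaw_app/BanahawApp/Report/model.py | __make_total_dict
-- ===== SOURCE A (Python) =====
-- def __make_total_dict(data):
-- 	retval = {
-- 		'total_allowance': 0,
-- 		'total_commision': 0,
-- 		'total_incentive': 0,
-- 		'total_gross_sales': 0,
-- 		'operational_expenses': 0,
-- 		'total_net_sales': 0,
-- 		'total_addons': 0,
-- 		'total_services': 0,
-- 		'total_members_p': 0,
-- 		'total_members_f': 0,
-- 		'total_members_u': 0
-- 	}
--
-- 	for key, value in data.items():
-- 		retval['total_allowance'] += value.get('allowance_total', 0)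
-- 		retval['total_commision'] += sum([value.get('commision_total_addons', 0), value.get('commision_total_service', 0)])
-- 		retval['total_incentive'] += sum([value.get('incentive_total_personalized', 0),
-- 										  value.get('incentive_total_family', 0),
-- 										  value.get('incentive_total_upgraded', 0)])
-- 		retval['total_gross_sales'] += sum([value.get('addons_total', 0),
-- 										    value.get('services_total', 0),
-- 										    value.get('personalized_total', 0),
-- 										    value.get('family_total', 0),
-- 										    value.get('upgraded_total', 0)])
-- 		retval['total_addons'] +=  value.get('addons_total', 0)
-- 		retval['total_services'] +=  value.get('services_total', 0)
-- 		retval['total_members_p'] +=  value.get('personalized_total', 0)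
-- 		retval['total_members_f'] +=  value.get('family_total', 0)
-- 		retval['total_members_u'] +=  value.get('upgraded_total', 0)
--
-- 	retval['total_net_sales'] = (retval['total_gross_sales'] -
-- 								 retval['total_incentive'] -
-- 								 retval['total_commision'] -
-- 								 retval['total_allowance'] -
-- 								 retval['operational_expenses'])
--
-- 	return retval
-- ===== SOURCE B (Python) =====
-- def __make_total_dict(data):
-- 	def col(key):
-- 		return sum(v.get(key, 0) for v in data.values())
--
-- 	total_allowance = col('allowance_total')
-- 	total_addons = col('addons_total')
-- 	total_services = col('services_total')
-- 	total_members_p = col('personalized_total')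
-- 	total_members_f = col('family_total')
-- 	total_members_u = col('upgraded_total')
-- 	total_commision = col('commision_total_addons') + col('commision_total_service')
-- 	total_incentive = (col('incentive_total_personalized') +
-- 					   col('incentive_total_family') +
-- 					   col('incentive_total_upgraded'))
-- 	total_gross_sales = (total_addons + total_services + total_members_p +
-- 						 total_members_f + total_members_u)
-- 	operational_expenses = 0
-- 	total_net_sales = (total_gross_sales - total_incentive - total_commision -
-- 					   total_allowance - operational_expenses)
--
-- 	return {
-- 		'total_allowance': total_allowance,
-- 		'total_commision': total_commision,
-- 		'total_incentive': total_incentive,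
-- 		'total_gross_sales': total_gross_sales,
-- 		'operational_expenses': operational_expenses,
-- 		'total_net_sales': total_net_sales,
-- 		'total_addons': total_addons,
-- 		'total_services': total_services,
-- 		'total_members_p': total_members_p,
-- 		'total_members_f': total_members_f,
-- 		'total_members_u': total_members_u
-- 	}
-- ===== Notes on version B (the rewrite author's own statement) =====
-- stated objective: simpler
-- what changed: Replaces A's single loop mutating an 11-key accumulator dict with independent per-column sums (one generator expression per source key), deriving the composite totals (commission, incentive, gross, net) from the column totals.
import Mathlib
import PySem

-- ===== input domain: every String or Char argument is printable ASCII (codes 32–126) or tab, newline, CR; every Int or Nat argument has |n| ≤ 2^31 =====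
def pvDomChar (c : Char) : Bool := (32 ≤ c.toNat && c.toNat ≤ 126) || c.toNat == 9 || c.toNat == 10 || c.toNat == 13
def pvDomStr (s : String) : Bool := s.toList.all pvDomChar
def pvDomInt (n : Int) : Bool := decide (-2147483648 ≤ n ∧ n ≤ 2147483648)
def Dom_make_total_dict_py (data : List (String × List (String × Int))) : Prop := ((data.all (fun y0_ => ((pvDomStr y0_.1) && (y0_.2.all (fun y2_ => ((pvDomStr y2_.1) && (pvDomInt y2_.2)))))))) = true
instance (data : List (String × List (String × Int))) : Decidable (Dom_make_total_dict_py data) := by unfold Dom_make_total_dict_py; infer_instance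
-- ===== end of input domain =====

-- B replaces A's single loop over an 11-key accumulator dict with independent per-column
-- sums, deriving the composite totals from the column totals (objective: simpler).

-- ===== PORT A =====
-- A's loop state: the nine accumulated dict entries, in A's update order
-- (allowance, commision, incentive, gross, addons, services, members_p, members_f, members_u).
def pvALoop (data : List (String × List (String × Int))) :
    Int × Int × Int × Int × Int × Int × Int × Int × Int :=
  data.foldl (fun acc kv =>
    let value := kv.2
    (acc.1 + PySem.Dict.getD (PySem.Dict.mk value) "allowance_total" 0,
     acc.2.1 + (PySem.Dict.getD (PySem.Dict.mk value) "commision_total_addons" 0 +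
                PySem.Dict.getD (PySem.Dict.mk value) "commision_total_service" 0),
     acc.2.2.1 + (PySem.Dict.getD (PySem.Dict.mk value) "incentive_total_personalized" 0 +
                  PySem.Dict.getD (PySem.Dict.mk value) "incentive_total_family" 0 +
                  PySem.Dict.getD (PySem.Dict.mk value) "incentive_total_upgraded" 0),
     acc.2.2.2.1 + (PySem.Dict.getD (PySem.Dict.mk value) "addons_total" 0 +
                    PySem.Dict.getD (PySem.Dict.mk value) "services_total" 0 +
                    PySem.Dict.getD (PySem.Dict.mk value) "personalized_total" 0 +
                    PySem.Dict.getD (PySem.Dict.mk value) "family_total" 0 +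
                    PySem.Dict.getD (PySem.Dict.mk value) "upgraded_total" 0),
     acc.2.2.2.2.1 + PySem.Dict.getD (PySem.Dict.mk value) "addons_total" 0,
     acc.2.2.2.2.2.1 + PySem.Dict.getD (PySem.Dict.mk value) "services_total" 0,
     acc.2.2.2.2.2.2.1 + PySem.Dict.getD (PySem.Dict.mk value) "personalized_total" 0,
     acc.2.2.2.2.2.2.2.1 + PySem.Dict.getD (PySem.Dict.mk value) "family_total" 0,
     acc.2.2.2.2.2.2.2.2 + PySem.Dict.getD (PySem.Dict.mk value) "upgraded_total" 0))
    (0, 0, 0, 0, 0, 0, 0, 0, 0)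

def make_total_dict_py (data : List (String × List (String × Int))) : List (String × Int) :=
  let r := pvALoop data
  [("total_allowance", r.1),
   ("total_commision", r.2.1),
   ("total_incentive", r.2.2.1),
   ("total_gross_sales", r.2.2.2.1),
   ("operational_expenses", 0),
   ("total_net_sales", r.2.2.2.1 - r.2.2.1 - r.2.1 - r.1 - 0),
   ("total_addons", r.2.2.2.2.1),
   ("total_services", r.2.2.2.2.2.1),
   ("total_members_p", r.2.2.2.2.2.2.1),
   ("total_members_f", r.2.2.2.2.2.2.2.1),
   ("total_members_u", r.2.2.2.2.2.2.2.2)]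

-- ===== PORT B =====
-- column sum: sum(v.get(key, 0) for v in data.values())
def pvCol (data : List (String × List (String × Int))) (key : String) : Int :=
  (data.map (fun kv => PySem.Dict.getD (PySem.Dict.mk kv.2) key 0)).sum

def make_total_dict_py_alt (data : List (String × List (String × Int))) : List (String × Int) :=
  let total_allowance := pvCol data "allowance_total"
  let total_addons := pvCol data "addons_total"
  let total_services := pvCol data "services_total"
  let total_members_p := pvCol data "personalized_total"
  let total_members_f := pvCol data "family_total"
  let total_members_u := pvCol data "upgraded_total"
  let total_commision := pvCol data "commision_total_addons" + pvCol data "commision_total_service"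
  let total_incentive := pvCol data "incentive_total_personalized" +
                         pvCol data "incentive_total_family" +
                         pvCol data "incentive_total_upgraded"
  let total_gross_sales := total_addons + total_services + total_members_p +
                           total_members_f + total_members_u
  let operational_expenses : Int := 0
  let total_net_sales := total_gross_sales - total_incentive - total_commision -
                         total_allowance - operational_expenses
  [("total_allowance", total_allowance),
   ("total_commision", total_commision),
   ("total_incentive", total_incentive),
   ("total_gross_sales", total_gross_sales),
   ("operational_expenses", operational_expenses),
   ("total_net_sales", total_net_sales),
   ("total_addons", total_addons),
   ("total_services", total_services),
   ("total_members_p", total_members_p),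
   ("total_members_f", total_members_f),
   ("total_members_u", total_members_u)]

-- ===== PRECONDITION & SPEC =====
def Spec_make_total_dict_py (data : List (String × List (String × Int))) (out : List (String × Int)) : Prop := out = make_total_dict_py_alt data
instance (data : List (String × List (String × Int))) (out : List (String × Int)) : Decidable (Spec_make_total_dict_py data out) := by unfold Spec_make_total_dict_py; infer_instance

-- ===== CLAIM (what is proved, stated in full; the proofs are below) =====
def Claim_equal_make_total_dict_py : Prop := ∀ (data : List (String × List (String × Int))), Dom_make_total_dict_py data → Spec_make_total_dict_py data (make_total_dict_py data)

-- ===== LEMMAS AND PROOFS =====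

-- Invariant: A's fold equals the initial state plus the per-column sums.
theorem pvALoop_inv (data : List (String × List (String × Int)))
    (a1 a2 a3 a4 a5 a6 a7 a8 a9 : Int) :
    data.foldl (fun acc kv =>
      let value := kv.2
      (acc.1 + PySem.Dict.getD (PySem.Dict.mk value) "allowance_total" 0,
       acc.2.1 + (PySem.Dict.getD (PySem.Dict.mk value) "commision_total_addons" 0 +
                  PySem.Dict.getD (PySem.Dict.mk value) "commision_total_service" 0),
       acc.2.2.1 + (PySem.Dict.getD (PySem.Dict.mk value) "incentive_total_personalized" 0 +
                    PySem.Dict.getD (PySem.Dict.mk value) "incentive_total_family" 0 +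
                    PySem.Dict.getD (PySem.Dict.mk value) "incentive_total_upgraded" 0),
       acc.2.2.2.1 + (PySem.Dict.getD (PySem.Dict.mk value) "addons_total" 0 +
                      PySem.Dict.getD (PySem.Dict.mk value) "services_total" 0 +
                      PySem.Dict.getD (PySem.Dict.mk value) "personalized_total" 0 +
                      PySem.Dict.getD (PySem.Dict.mk value) "family_total" 0 +
                      PySem.Dict.getD (PySem.Dict.mk value) "upgraded_total" 0),
       acc.2.2.2.2.1 + PySem.Dict.getD (PySem.Dict.mk value) "addons_total" 0,
       acc.2.2.2.2.2.1 + PySem.Dict.getD (PySem.Dict.mk value) "services_total" 0,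
       acc.2.2.2.2.2.2.1 + PySem.Dict.getD (PySem.Dict.mk value) "personalized_total" 0,
       acc.2.2.2.2.2.2.2.1 + PySem.Dict.getD (PySem.Dict.mk value) "family_total" 0,
       acc.2.2.2.2.2.2.2.2 + PySem.Dict.getD (PySem.Dict.mk value) "upgraded_total" 0))
      (a1, a2, a3, a4, a5, a6, a7, a8, a9) =
    (a1 + pvCol data "allowance_total",
     a2 + (pvCol data "commision_total_addons" + pvCol data "commision_total_service"),
     a3 + (pvCol data "incentive_total_personalized" + pvCol data "incentive_total_family" +
           pvCol data "incentive_total_upgraded"),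
     a4 + (pvCol data "addons_total" + pvCol data "services_total" +
           pvCol data "personalized_total" + pvCol data "family_total" +
           pvCol data "upgraded_total"),
     a5 + pvCol data "addons_total",
     a6 + pvCol data "services_total",
     a7 + pvCol data "personalized_total",
     a8 + pvCol data "family_total",
     a9 + pvCol data "upgraded_total") := by
  induction data generalizing a1 a2 a3 a4 a5 a6 a7 a8 a9 with
  | nil => simp [pvCol]
  | cons hd tl ih =>
      simp only [List.foldl_cons, ih, pvCol, List.map_cons, List.sum_cons]
      refine Prod.ext ?_ (Prod.ext ?_ (Prod.ext ?_ (Prod.ext ?_ (Prod.ext ?_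
        (Prod.ext ?_ (Prod.ext ?_ (Prod.ext ?_ ?_))))))) <;> simp <;> ring

-- ===== VERDICT (by name: the statement is the Claim_ definition above) =====
theorem make_total_dict_py_spec : Claim_equal_make_total_dict_py := by
  intro data _
  show make_total_dict_py data = make_total_dict_py_alt data
  simp only [make_total_dict_py, make_total_dict_py_alt, pvALoop, pvALoop_inv]
  norm_num
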